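-- pv_equiv track=rewrite | github.com/kkulykk/puzzle | puzzle.py | check_rule_1
-- ===== SOURCE A (Python) =====
-- def check_rule_1(board: list) -> bool:
--     """
--     Checks whether the board satisfies game rule 1.
--     >>> check_rule_1(["**** ****", "***1 ****", "** 3****", "* 4 1****",\
--          "     9 5 ", " 6  83  *", "3   1  **", "  8  2***", "  2  ****"])
--     True
--     """
--     only_numbers = []
--     for i in board:
--         number = "".join(j for j in i if j in "0123456789")
--         only_numbers.append(number)
--         number = ""
--     for i in only_numbers:
--         if len(i) != len(set(i)):
--             return False
--     return True
-- ===== SOURCE B (Python) =====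
-- def check_rule_1(board: list) -> bool:
--     for row in board:
--         digits = sorted(c for c in row if c in "0123456789")
--         for k in range(1, len(digits)):
--             if digits[k - 1] == digits[k]:
--                 return False
--     return True
-- ===== Notes on version B (the rewrite author's own statement) =====
-- stated objective: alternative
-- what changed: Per-row duplicate detection by sorting the row's digits and scanning for an equal adjacent pair, instead of materialising all digit strings first and comparing each string's length with its set's size.
import Mathlib
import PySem

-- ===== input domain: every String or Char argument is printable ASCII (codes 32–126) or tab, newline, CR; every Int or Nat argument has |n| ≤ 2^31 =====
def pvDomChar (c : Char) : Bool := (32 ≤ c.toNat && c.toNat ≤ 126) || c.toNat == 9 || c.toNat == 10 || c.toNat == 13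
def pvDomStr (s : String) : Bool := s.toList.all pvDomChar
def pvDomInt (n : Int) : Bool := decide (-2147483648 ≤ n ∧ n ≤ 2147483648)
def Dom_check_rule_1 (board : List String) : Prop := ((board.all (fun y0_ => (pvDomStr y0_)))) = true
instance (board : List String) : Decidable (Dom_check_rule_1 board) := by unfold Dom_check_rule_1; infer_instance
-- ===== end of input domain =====

-- B detects a duplicate digit in a row by sorting the row's digits and scanning for an
-- equal adjacent pair, instead of A's set-size-vs-length comparison (objective: alternative).

-- ===== PORT A =====
-- second loop of A: return False on the first digit string whose set is smaller
def pvCheckLoopA : List (List Char) → Bool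
  | [] => true
  | i :: rest => if i.length ≠ (PySem.Set.ofList i).length then false else pvCheckLoopA rest

def check_rule_1 (board : List String) : Bool :=
  -- first loop: only_numbers.append("".join(j for j in i if j in "0123456789"))
  let only_numbers := board.foldl
    (fun acc i => acc ++ [i.toList.filter (fun j => ("0123456789".toList).contains j)]) []
  pvCheckLoopA only_numbers

-- ===== PORT B =====
-- inner loop of B: digits[k-1] == digits[k] for some k, scanned left to right
def pvNoAdjDup : List Char → Bool
  | a :: b :: rest => if a == b then false else pvNoAdjDup (b :: rest)
  | _ => true

def pvRowOk (row : String) : Bool :=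
  pvNoAdjDup (PySem.List.sorted (row.toList.filter (fun c => ("0123456789".toList).contains c))
    (fun x => x) false)

def check_rule_1_alt (board : List String) : Bool := board.all pvRowOk

-- ===== PRECONDITION & SPEC =====
def Spec_check_rule_1 (board : List String) (out : Bool) : Prop := out = check_rule_1_alt board
instance (board : List String) (out : Bool) : Decidable (Spec_check_rule_1 board out) := by unfold Spec_check_rule_1; infer_instance

-- ===== CLAIM (what is proved, stated in full; the proofs are below) =====
def Claim_equal_check_rule_1 : Prop := ∀ (board : List String), Dom_check_rule_1 board → Spec_check_rule_1 board (check_rule_1 board)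

-- ===== LEMMAS AND PROOFS =====

theorem pv_foldl_app {α β : Type} (f : α → List β) :
    ∀ (l : List α) (acc : List (List β)),
      l.foldl (fun acc i => acc ++ [f i]) acc = acc ++ l.map f := by
  intro l
  induction l with
  | nil => intro acc; simp
  | cons x xs ih => intro acc; simp [ih]

theorem pv_add_len_le (s : List Char) (x : Char) :
    (PySem.Set.add s x).length ≤ s.length + 1 := by
  simp only [PySem.Set.add]
  split <;> simp

theorem pv_foldl_add_len_le :
    ∀ (xs : List Char) (s : PySem.Set Char),
      (xs.foldl PySem.Set.add s).length ≤ s.length + xs.length := by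
  intro xs
  induction xs with
  | nil => intro s; simp
  | cons x xs ih =>
    intro s
    have h := ih (PySem.Set.add s x)
    have h2 := pv_add_len_le s x
    simp only [List.foldl_cons, List.length_cons]
    omega

theorem pv_foldl_add_len_eq :
    ∀ (xs : List Char) (s : PySem.Set Char),
      (xs.foldl PySem.Set.add s).length = s.length + xs.length →
      xs.Nodup ∧ ∀ x ∈ xs, x ∉ s := by
  intro xs
  induction xs with
  | nil => intro s _; simp
  | cons x xs ih =>
    intro s h
    simp only [List.foldl_cons] at h
    by_cases hx : x ∈ s
    · exfalso
      have hadd : PySem.Set.add s x = s := by simp [PySem.Set.add, hx]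
      rw [hadd] at h
      have := pv_foldl_add_len_le xs s
      simp [List.length_cons] at h
      omega
    · have hadd : PySem.Set.add s x = s ++ [x] := by simp [PySem.Set.add, hx]
      rw [hadd] at h
      have hlen : (s ++ [x]).length = s.length + 1 := by simp
      have hih := ih (s ++ [x]) (by rw [hlen]; simp at h ⊢; omega)
      obtain ⟨hnd, hmem⟩ := hih
      have hxs : x ∉ s := hx
      refine ⟨List.nodup_cons.mpr ⟨?_, hnd⟩, ?_⟩
      · intro hc
        have := hmem x hc
        simp at this
      · intro y hy
        rcases List.mem_cons.mp hy with hy | hy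
        · subst hy; exact hxs
        · intro hc
          have := hmem y hy
          simp [hc] at this

theorem pv_len_set_iff (d : List Char) :
    (d.length = (PySem.Set.ofList d).length) ↔ d.Nodup := by
  constructor
  · intro h
    have : PySem.Set.ofList d = d.foldl PySem.Set.add [] := PySem.Set.ofList_eq_foldl d
    rw [this] at h
    exact (pv_foldl_add_len_eq d [] (by simpa using h.symm)).1
  · intro h
    rw [PySem.Set.ofList_eq_self_of_nodup d h]

theorem pv_noAdj_sorted :
    ∀ (t : List Char), t.Pairwise (· ≤ ·) → (pvNoAdjDup t = true ↔ t.Nodup) := by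
  intro t
  induction t with
  | nil => intro _; simp [pvNoAdjDup]
  | cons a t ih =>
    intro hp
    cases t with
    | nil => simp [pvNoAdjDup]
    | cons b rest =>
      have hp' : (b :: rest).Pairwise (· ≤ ·) := hp.tail
      have hab : a ≤ b := (List.pairwise_cons.mp hp).1 b (by simp)
      have harest : ∀ y ∈ rest, a ≤ y := fun y hy =>
        (List.pairwise_cons.mp hp).1 y (by simp [hy])
      by_cases heq : a = b
      · subst heq
        simp [pvNoAdjDup]
      · have hlt : a < b := lt_of_le_of_ne hab heq
        have hbr : ∀ y ∈ rest, b ≤ y := fun y hy =>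
          (List.pairwise_cons.mp hp').1 y hy
        have step : pvNoAdjDup (a :: b :: rest) = pvNoAdjDup (b :: rest) := by
          simp [pvNoAdjDup, heq]
        rw [step, ih hp']
        constructor
        · intro hnd
          refine List.nodup_cons.mpr ⟨?_, hnd⟩
          intro hc
          rcases List.mem_cons.mp hc with hc | hc
          · exact heq hc
          · exact absurd (lt_of_lt_of_le hlt (hbr a hc)) (lt_irrefl a)
        · intro hnd
          exact hnd.tail

theorem pv_row_eq (d : List Char) :
    (decide (¬ d.length ≠ (PySem.Set.ofList d).length) : Bool)
      = pvNoAdjDup (PySem.List.sorted d (fun x => x) false) := by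
  have hperm : (PySem.List.sorted d (fun x => x) false).Perm d := PySem.List.sorted_perm d _ _
  have hpw : (PySem.List.sorted d (fun x => x) false).Pairwise (· ≤ ·) := by
    simpa using PySem.List.sorted_pairwise (xs := d) (key := fun x : Char => x)
  have h1 : (d.length = (PySem.Set.ofList d).length) ↔
      pvNoAdjDup (PySem.List.sorted d (fun x => x) false) = true := by
    rw [pv_len_set_iff, ← hperm.nodup_iff]
    exact (pv_noAdj_sorted _ hpw).symm
  by_cases h : d.length = (PySem.Set.ofList d).length
  · simp [h, (h1.mp h)]
  · have : pvNoAdjDup (PySem.List.sorted d (fun x => x) false) = false := by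
      cases hb : pvNoAdjDup (PySem.List.sorted d (fun x => x) false)
      · rfl
      · exact absurd (h1.mpr hb) h
    simp [h, this]

theorem pv_loop_eq (f : String → List Char) :
    ∀ (l : List String),
      pvCheckLoopA (l.map f)
        = l.all (fun i => decide (¬ (f i).length ≠ (PySem.Set.ofList (f i)).length)) := by
  intro l
  induction l with
  | nil => simp [pvCheckLoopA]
  | cons x xs ih =>
    simp only [List.map_cons, pvCheckLoopA, List.all_cons, ih]
    by_cases h : (f x).length ≠ (PySem.Set.ofList (f x)).length
    · simp [h]
    · simp [h]

-- ===== VERDICT (by name: the statement is the Claim_ definition above) =====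
theorem check_rule_1_spec : Claim_equal_check_rule_1 := by
  intro board _
  unfold Spec_check_rule_1 check_rule_1 check_rule_1_alt
  rw [pv_foldl_app (fun i : String => i.toList.filter (fun j => ("0123456789".toList).contains j)) board []]
  simp only [List.nil_append]
  rw [pv_loop_eq]
  have hfun : (fun i : String =>
      decide (¬ (i.toList.filter (fun j => ("0123456789".toList).contains j)).length ≠
        (PySem.Set.ofList (i.toList.filter (fun j => ("0123456789".toList).contains j))).length))
      = pvRowOk := by
    funext i
    rw [pv_row_eq]
    rfl
  rw [hfun]
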